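-- pv_equiv track=rewrite | github.com/PasaOpasen/ContentDetector | content_detector/prepare_functions.py | split_by_words2
-- ===== SOURCE A (Python) =====
-- def split_by_words2(sentence, words):
--     """
--     Делает split предложения по stopwords
--     """
--     result = []
--     tmp=[]
--     for w in sentence.split():
--         if w in words:
--             if len(tmp)>0:
--                 result.append(' '.join(tmp))
--                 tmp=[]
--         else:
--             tmp.append(w)
--
--     if len(tmp)>0:
--         result.append(' '.join(tmp))
--
--     return result
-- ===== SOURCE B (Python) =====
-- def split_by_words2(sentence, words):
--     """
--     Делает split предложения по stopwords
--     """
--     result = []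
--     tokens = sentence.split()
--     while tokens:
--         if tokens[0] in words:
--             tokens = tokens[1:]
--         else:
--             k = 1
--             while k < len(tokens) and tokens[k] not in words:
--                 k += 1
--             result.append(' '.join(tokens[:k]))
--             tokens = tokens[k:]
--     return result
-- ===== Notes on version B (the rewrite author's own statement) =====
-- stated objective: alternative
-- what changed: Replaces the tmp-accumulator loop with its mid-loop and trailing flushes by a two-pointer span scan: skip stopwords, find the end of each maximal non-stopword run, join and emit it in one step.
import Mathlib
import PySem

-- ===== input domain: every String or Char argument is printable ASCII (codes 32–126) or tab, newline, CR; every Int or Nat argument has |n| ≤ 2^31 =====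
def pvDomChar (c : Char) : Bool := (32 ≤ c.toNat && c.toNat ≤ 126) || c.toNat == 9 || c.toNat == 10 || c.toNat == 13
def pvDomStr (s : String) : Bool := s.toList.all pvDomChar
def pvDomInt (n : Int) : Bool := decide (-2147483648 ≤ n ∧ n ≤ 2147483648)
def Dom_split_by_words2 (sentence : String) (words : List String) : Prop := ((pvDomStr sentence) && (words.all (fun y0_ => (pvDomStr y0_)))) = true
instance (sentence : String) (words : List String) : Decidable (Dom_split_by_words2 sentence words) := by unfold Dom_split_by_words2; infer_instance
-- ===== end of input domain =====

-- B replaces A's tmp-accumulator loop (with mid-loop and trailing flushes) by a two-pointer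
-- span scan emitting each maximal non-stopword run directly; return values are proved equal.

-- ===== PORT A =====
def split_by_words2 (sentence : String) (words : List String) : List String :=
  let st := (PySem.Str.split₀ sentence).foldl
    (fun (st : List String × List String) w =>
      if words.contains w then
        if st.2.length > 0 then (st.1 ++ [PySem.Str.join " " st.2], ([] : List String)) else st
      else (st.1, st.2 ++ [w]))
    ([], [])
  if st.2.length > 0 then st.1 ++ [PySem.Str.join " " st.2] else st.1

-- ===== PORT B =====
-- the inner `while k < len(tokens) and tokens[k] not in words` scan = takeWhile/dropWhile over
-- the tail; tokens[:k] = w :: that prefix, tokens[k:] = the remaining suffix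
def pvSpanLoop (words : List String) : List String → List String
  | [] => []
  | w :: ws =>
    if words.contains w then pvSpanLoop words ws
    else PySem.Str.join " " (w :: ws.takeWhile (fun x => !(words.contains x))) ::
         pvSpanLoop words (ws.dropWhile (fun x => !(words.contains x)))
termination_by ts => ts.length
decreasing_by
  · simp
  · exact Nat.lt_succ_of_le (List.length_dropWhile_le _ _)

def split_by_words2_alt (sentence : String) (words : List String) : List String :=
  pvSpanLoop words (PySem.Str.split₀ sentence)

-- ===== PRECONDITION & SPEC =====
def Spec_split_by_words2 (sentence : String) (words : List String) (out : List String) : Prop := out = split_by_words2_alt sentence words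
instance (sentence : String) (words : List String) (out : List String) : Decidable (Spec_split_by_words2 sentence words out) := by unfold Spec_split_by_words2; infer_instance

-- ===== CLAIM (what is proved, stated in full; the proofs are below) =====
def Claim_equal_split_by_words2 : Prop := ∀ (sentence : String) (words : List String), Dom_split_by_words2 sentence words → Spec_split_by_words2 sentence words (split_by_words2 sentence words)

-- ===== LEMMAS AND PROOFS =====

-- what B produces when a (possibly empty) run `tmp` of non-stopwords is already pending before `ts`
def pvPend (words : List String) (tmp ts : List String) : List String :=
  (if tmp ++ ts.takeWhile (fun x => !(words.contains x)) = [] then []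
   else [PySem.Str.join " " (tmp ++ ts.takeWhile (fun x => !(words.contains x)))]) ++
  pvSpanLoop words (ts.dropWhile (fun x => !(words.contains x)))

theorem pvPend_nil (words ts : List String) : pvPend words [] ts = pvSpanLoop words ts := by
  cases ts with
  | nil => simp [pvPend, pvSpanLoop]
  | cons w ws =>
    by_cases h : w ∈ words
    · simp [pvPend, pvSpanLoop, h]
    · simp [pvPend, pvSpanLoop, h]

theorem pvPend_cons_mem (words : List String) (w : String) (tmp ws : List String)
    (h : w ∈ words) :
    pvPend words tmp (w :: ws)
      = (if tmp = [] then [] else [PySem.Str.join " " tmp]) ++ pvPend words [] ws := by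
  rw [pvPend_nil]
  by_cases ht : tmp = []
  · simp [pvPend, h, pvSpanLoop, ht]
  · simp [pvPend, h, pvSpanLoop, ht]

theorem pvPend_cons_not_mem (words : List String) (w : String) (tmp ws : List String)
    (h : w ∉ words) :
    pvPend words tmp (w :: ws) = pvPend words (tmp ++ [w]) ws := by
  simp [pvPend, h]

theorem pvInvariant (words : List String) (ts : List String) :
    ∀ result tmp : List String,
      (let st := ts.foldl
        (fun (st : List String × List String) w =>
          if words.contains w then
            if st.2.length > 0 then (st.1 ++ [PySem.Str.join " " st.2], ([] : List String)) else st
          else (st.1, st.2 ++ [w]))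
        (result, tmp)
       if st.2.length > 0 then st.1 ++ [PySem.Str.join " " st.2] else st.1)
      = result ++ pvPend words tmp ts := by
  induction ts with
  | nil =>
    intro result tmp
    cases tmp with
    | nil => simp [pvPend, pvSpanLoop]
    | cons a t => simp [pvPend, pvSpanLoop]
  | cons w ws ih =>
    intro result tmp
    by_cases h : w ∈ words
    · have hc : words.contains w = true := by simpa using h
      cases tmp with
      | nil =>
        simp only [List.foldl_cons, hc, if_true, List.length_nil, gt_iff_lt, lt_self_iff_false, if_false]
        rw [ih result [], pvPend_cons_mem words w [] ws h]
        simp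
      | cons a t =>
        simp only [List.foldl_cons, hc, if_true, List.length_cons, gt_iff_lt, Nat.zero_lt_succ]
        rw [ih (result ++ [PySem.Str.join " " (a :: t)]) [],
          pvPend_cons_mem words w (a :: t) ws h]
        simp
    · have hc : words.contains w = false := by simpa using h
      simp only [List.foldl_cons, hc, Bool.false_eq_true, if_false]
      rw [ih result (tmp ++ [w]), pvPend_cons_not_mem words w tmp ws h]

-- ===== VERDICT (by name: the statement is the Claim_ definition above) =====
theorem split_by_words2_spec : Claim_equal_split_by_words2 := by
  intro sentence words _
  unfold Spec_split_by_words2 split_by_words2 split_by_words2_alt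
  simpa [pvPend_nil] using pvInvariant words (PySem.Str.split₀ sentence) [] []
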